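-- pv_equiv track=rewrite | github.com/andyfriedrich-amd/HipifyPlus-tools | token_compressor_cpp.py | split_code
-- ===== SOURCE A (Python) =====
-- def split_code(code):
--     # Split code based on indentation
--     lines = code.split('\n')
--
--     file_contents = []
--     current_indent = 0
--     current_file_content = ''
--     for line in lines:
--         stripped_line = line.strip()
--         indentation = len(line) - len(stripped_line)
--
--         if stripped_line.startswith(('def ', 'class ')) and indentation == 0:
--             # Create a new file for functions and classes
--             file_contents.append(current_file_content)
--             current_file_content = ''
--
--         current_file_content += line
--         current_file_content += '\n'
--
--     file_contents.append(current_file_content)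
--
--     return file_contents
-- ===== SOURCE B (Python) =====
-- def _starts_chunk(line):
--     stripped = line.strip()
--     return len(stripped) == len(line) and stripped.startswith(('def ', 'class '))
--
--
-- def split_code(code):
--     # Walk the lines back to front: collect a buffer of lines until a
--     # top-level def/class line is reached, which completes one chunk.
--     lines = code.split('\n')
--     chunks = []
--     buf = []
--     for line in reversed(lines):
--         buf.append(line)
--         if _starts_chunk(line):
--             chunks.append(''.join(l + '\n' for l in reversed(buf)))
--             buf = []
--     chunks.append(''.join(l + '\n' for l in reversed(buf)))
--     chunks.reverse()
--     return chunks
-- ===== Notes on version B (the rewrite author's own statement) =====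
-- stated objective: alternative
-- what changed: B traverses the lines back to front, buffering lines in a list until a top-level def/class line completes a chunk (joined once per chunk), then reverses the chunk list, instead of A's forward scan that grows the current chunk by string concatenation and flushes it when the next boundary arrives.
import Mathlib
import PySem

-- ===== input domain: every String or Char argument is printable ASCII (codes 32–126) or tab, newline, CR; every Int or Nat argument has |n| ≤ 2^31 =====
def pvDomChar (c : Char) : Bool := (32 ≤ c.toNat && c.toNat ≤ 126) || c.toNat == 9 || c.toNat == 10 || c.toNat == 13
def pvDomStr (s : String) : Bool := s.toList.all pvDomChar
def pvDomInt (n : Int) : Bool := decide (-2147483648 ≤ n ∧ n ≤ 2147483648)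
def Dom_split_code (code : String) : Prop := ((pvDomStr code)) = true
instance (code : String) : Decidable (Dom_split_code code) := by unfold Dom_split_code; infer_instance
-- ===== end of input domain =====

-- B walks the lines back to front, buffering lines until a top-level def/class
-- line completes a chunk, then reverses the chunk list (objective: alternative
-- decomposition, same cost).

-- ===== PORT A =====
def split_code (code : String) : List String :=
  let lines := (PySem.Str.split? code "\n").getD []   -- sep "\n" ≠ "", so split? is always `some`
  let st := lines.foldl
    (fun (st : List String × String) line =>
      let stripped := PySem.Str.strip line
      let indentation := PySem.Str.len line - PySem.Str.len stripped
      let st' :=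
        if (PySem.Str.startswith stripped "def " || PySem.Str.startswith stripped "class ")
            && indentation == 0 then
          (st.1 ++ [st.2], "")
        else st
      (st'.1, st'.2 ++ line ++ "\n"))
    ([], "")
  st.1 ++ [st.2]

-- ===== PORT B =====
def starts_chunk (line : String) : Bool :=
  let stripped := PySem.Str.strip line
  (PySem.Str.len stripped == PySem.Str.len line)
    && (PySem.Str.startswith stripped "def " || PySem.Str.startswith stripped "class ")

def split_code_alt (code : String) : List String :=
  let lines := (PySem.Str.split? code "\n").getD []   -- sep "\n" ≠ "", so split? is always `some`
  let st := lines.reverse.foldl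
    (fun (st : List String × List String) line =>
      let buf := st.2 ++ [line]
      if starts_chunk line then
        (st.1 ++ [PySem.Str.join "" (buf.reverse.map (fun l => l ++ "\n"))], [])
      else (st.1, buf))
    ([], [])
  (st.1 ++ [PySem.Str.join "" (st.2.reverse.map (fun l => l ++ "\n"))]).reverse

-- ===== PRECONDITION & SPEC =====
def Spec_split_code (code : String) (out : List String) : Prop := out = split_code_alt code
instance (code : String) (out : List String) : Decidable (Spec_split_code code out) := by unfold Spec_split_code; infer_instance

-- ===== CLAIM (what is proved, stated in full; the proofs are below) =====
def Claim_equal_split_code : Prop := ∀ (code : String), Dom_split_code code → Spec_split_code code (split_code code)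

-- ===== LEMMAS AND PROOFS =====

/-- A chunk: every buffered line followed by a newline, concatenated. -/
def pvRender (ls : List String) : String := PySem.Str.join "" (ls.map (fun l => l ++ "\n"))

/-- Right-recursive reference: (lines of the first chunk, the remaining rendered chunks). -/
def pvChunks : List String → List String × List String
  | [] => ([], [])
  | l :: ls =>
    let p := pvChunks ls
    if starts_chunk l then ([], pvRender (l :: p.1) :: p.2) else (l :: p.1, p.2)

/-- A's loop body, with the boundary test expressed through `starts_chunk`. -/
def pvStepA (st : List String × String) (line : String) : List String × String :=
  if starts_chunk line then (st.1 ++ [st.2], "" ++ line ++ "\n") else (st.1, st.2 ++ line ++ "\n")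

/-- B's loop body. -/
def pvStepB (st : List String × List String) (line : String) : List String × List String :=
  if starts_chunk line then
    (st.1 ++ [PySem.Str.join "" ((st.2 ++ [line]).reverse.map (fun l => l ++ "\n"))], [])
  else (st.1, st.2 ++ [line])

lemma pvRender_nil : pvRender [] = "" := by
  apply String.toList_inj.mp
  simp [pvRender, PySem.Str.toList_join, PySem.Chars.join_nil]

lemma pvRender_cons (l : String) (ls : List String) :
    pvRender (l :: ls) = l ++ "\n" ++ pvRender ls := by
  apply String.toList_inj.mp
  cases ls with
  | nil =>
    simp [pvRender, PySem.Str.toList_join, PySem.Chars.join_nil, PySem.Chars.join_singleton]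
  | cons m ms =>
    simp [pvRender, PySem.Str.toList_join, PySem.Chars.join_cons_cons]

/-- A's inline boundary test is B's `starts_chunk`. -/
lemma pvCond_eq (line : String) :
    ((PySem.Str.startswith (PySem.Str.strip line) "def "
        || PySem.Str.startswith (PySem.Str.strip line) "class ")
      && (PySem.Str.len line - PySem.Str.len (PySem.Str.strip line) == 0))
      = starts_chunk line := by
  simp only [starts_chunk]
  cases hsw : (PySem.Str.startswith (PySem.Str.strip line) "def "
      || PySem.Str.startswith (PySem.Str.strip line) "class ") with
  | false => simp
  | true =>
    rw [Bool.eq_iff_iff]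
    simp [beq_iff_eq]
    omega

/-- A's loop body equals `pvStepA`. -/
lemma pvStepA_eq :
    (fun (st : List String × String) line =>
      let stripped := PySem.Str.strip line
      let indentation := PySem.Str.len line - PySem.Str.len stripped
      let st' :=
        if (PySem.Str.startswith stripped "def " || PySem.Str.startswith stripped "class ")
            && indentation == 0 then
          (st.1 ++ [st.2], "")
        else st
      (st'.1, st'.2 ++ line ++ "\n")) = pvStepA := by
  funext st line
  simp only [pvStepA, pvCond_eq]
  by_cases h : starts_chunk line <;> simp [h]

/-- B's loop body equals `pvStepB`. -/
lemma pvStepB_eq :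
    (fun (st : List String × List String) line =>
      let buf := st.2 ++ [line]
      if starts_chunk line then
        (st.1 ++ [PySem.Str.join "" (buf.reverse.map (fun l => l ++ "\n"))], [])
      else (st.1, buf)) = pvStepB := by
  funext st line
  simp [pvStepB]

/-- Invariant of A's forward fold. -/
lemma pvFoldA (ls : List String) : ∀ (acc : List String) (cur : String),
    (ls.foldl pvStepA (acc, cur)).1 ++ [(ls.foldl pvStepA (acc, cur)).2]
      = acc ++ (cur ++ pvRender (pvChunks ls).1) :: (pvChunks ls).2 := by
  induction ls with
  | nil => intro acc cur; simp [pvChunks, pvRender_nil]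
  | cons l ls ih =>
    intro acc cur
    by_cases h : starts_chunk l
    · have hst : pvStepA (acc, cur) l = (acc ++ [cur], "" ++ l ++ "\n") := by
        simp [pvStepA, h]
      rw [List.foldl_cons, hst, ih]
      simp [pvChunks, h, pvRender_cons, pvRender_nil, String.append_assoc, String.empty_append]
    · have hst : pvStepA (acc, cur) l = (acc, cur ++ l ++ "\n") := by
        simp [pvStepA, h]
      rw [List.foldl_cons, hst, ih]
      simp [pvChunks, h, pvRender_cons, String.append_assoc]

/-- Invariant of B's backward fold, seen as a `foldr`. -/
lemma pvFoldB (ls : List String) :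
    ls.foldr (fun line st => pvStepB st line) ([], [])
      = ((pvChunks ls).2.reverse, (pvChunks ls).1.reverse) := by
  induction ls with
  | nil => simp [pvChunks]
  | cons l ls ih =>
    rw [List.foldr_cons, ih]
    by_cases h : starts_chunk l
    · simp [pvStepB, pvChunks, h, pvRender]
    · simp [pvStepB, pvChunks, h]

-- ===== VERDICT (by name: the statement is the Claim_ definition above) =====
theorem split_code_spec : Claim_equal_split_code := by
  intro code _
  unfold Spec_split_code split_code split_code_alt
  rw [pvStepA_eq, pvStepB_eq]
  generalize (PySem.Str.split? code "\n").getD [] = ls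
  simp only [List.foldl_reverse, pvFoldB, pvFoldA]
  simp [pvRender, String.empty_append]
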